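-- pv_equiv track=rewrite | github.com/arthurvenicio/data-sctructures | codesignal/duplicate_digits/main.py | solution
-- ===== SOURCE A (Python) =====
-- def solution(n):
--     num = 0
--     mut = 1
--
--     while n > 0:
--         digit = n % 10
--         num += digit * mut
--         mut = mut * 10
--         num += digit * mut
--         mut = mut * 10
--         n //= 10
--     return num
-- ===== SOURCE B (Python) =====
-- def solution(n):
--     if n <= 0:
--         return 0
--     return 100 * solution(n // 10) + 11 * (n % 10)
-- ===== Notes on version B (the rewrite author's own statement) =====
-- stated objective: simpler
-- what changed: Replaces A's while loop with two accumulators (running number and a place-value multiplier) by a three-line recursion that builds the result from the most-significant end as 100*solution(n//10) + 11*(n%10), with no accumulator state.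
import Mathlib
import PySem

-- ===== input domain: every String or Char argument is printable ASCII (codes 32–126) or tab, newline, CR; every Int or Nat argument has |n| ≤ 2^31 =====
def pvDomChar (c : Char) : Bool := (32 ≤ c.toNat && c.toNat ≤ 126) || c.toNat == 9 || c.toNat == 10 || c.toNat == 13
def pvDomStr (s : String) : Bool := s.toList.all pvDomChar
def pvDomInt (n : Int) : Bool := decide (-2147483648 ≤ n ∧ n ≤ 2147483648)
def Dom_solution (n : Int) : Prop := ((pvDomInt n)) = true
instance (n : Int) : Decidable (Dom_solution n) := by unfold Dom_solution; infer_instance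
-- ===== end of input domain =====

-- B replaces A's accumulator while-loop by a direct recursion (100*rec + 11*digit), a simpler decomposition; same value on every int.


-- ===== PORT A =====
-- the 'while n > 0' loop over state (n, num, mlt), step for step
def solutionLoop (n num mlt : Int) : Int :=
  if h : n > 0 then
    let digit := PySem.Int.mod n 10
    let num := num + digit * mlt
    let mlt := mlt * 10
    let num := num + digit * mlt
    let mlt := mlt * 10
    solutionLoop (PySem.Int.floordiv n 10) num mlt
  else num
termination_by n.toNat
decreasing_by
  rw [PySem.Int.floordiv_eq_ediv_of_pos (by omega)]
  omega

def solution (n : Int) : Int := solutionLoop n 0 1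

-- ===== PORT B =====
def solution_alt (n : Int) : Int :=
  if h : n ≤ 0 then 0
  else 100 * solution_alt (PySem.Int.floordiv n 10) + 11 * PySem.Int.mod n 10
termination_by n.toNat
decreasing_by
  rw [PySem.Int.floordiv_eq_ediv_of_pos (by omega)]
  omega

-- ===== PRECONDITION & SPEC =====
def Spec_solution (n : Int) (out : Int) : Prop := out = solution_alt n
instance (n : Int) (out : Int) : Decidable (Spec_solution n out) := by unfold Spec_solution; infer_instance

-- ===== CLAIM (what is proved, stated in full; the proofs are below) =====
def Claim_equal_solution : Prop := ∀ (n : Int), Dom_solution n → Spec_solution n (solution n)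

-- ===== LEMMAS AND PROOFS =====

-- loop invariant: A's loop adds mlt times B's recursive value to the accumulator
theorem solutionLoop_eq (k : Nat) : ∀ (n num mlt : Int), n.toNat ≤ k →
    solutionLoop n num mlt = num + mlt * solution_alt n := by
  induction k with
  | zero =>
    intro n num mlt hk
    rw [solutionLoop, solution_alt]
    have hn : ¬ n > 0 := by omega
    have hn' : n ≤ 0 := by omega
    simp [hn, hn']
  | succ k ih =>
    intro n num mlt hk
    rw [solutionLoop]
    by_cases h : n > 0
    · have hdiv : PySem.Int.floordiv n 10 = n / 10 :=
        PySem.Int.floordiv_eq_ediv_of_pos (by omega)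
      have hrec := ih (PySem.Int.floordiv n 10) (num + PySem.Int.mod n 10 * mlt +
        PySem.Int.mod n 10 * (mlt * 10)) (mlt * 10 * 10) (by rw [hdiv]; omega)
      simp only [h, dite_true]
      rw [hrec]
      have h' : ¬ n ≤ 0 := by omega
      conv_rhs => rw [solution_alt]
      simp only [h', dite_false]
      ring
    · have h' : n ≤ 0 := by omega
      rw [solution_alt]
      simp [h, h']

-- ===== VERDICT (by name: the statement is the Claim_ definition above) =====
theorem solution_spec : Claim_equal_solution := by
  intro n _
  unfold Spec_solution solution
  rw [solutionLoop_eq n.toNat n 0 1 le_rfl]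
  ring
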